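-- pv_equiv track=rewrite | github.com/lepisma/beets-bbq | beetsplug/bbq.py | get_bbq_patterns
-- ===== SOURCE A (Python) =====
-- def get_bbq_patterns(pattern):
--     """
--     Return union and exception patterns
--     """
--
--     tokens = pattern.split(" ")
--
--     bbq_patterns = []
--
--     last_token = "+"
--     in_range = True
--
--     for idx, token in enumerate(tokens):
--         if token == "+" or token == "-":
--             last_token = token
--             in_range = False
--         else:
--             if not in_range or idx == 0:
--                 bbq_patterns.append(last_token + token)
--             else:
--                 bbq_patterns[-1] = bbq_patterns[-1] + " " + token
--
--             in_range = True
--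
--     return bbq_patterns
-- ===== SOURCE B (Python) =====
-- def get_bbq_patterns(pattern):
--     """
--     Return union and exception patterns
--     """
--     tokens = pattern.split(" ")
--     bbq_patterns = []
--     sign = "+"
--     i = 0
--     while i < len(tokens):
--         token = tokens[i]
--         if token == "+" or token == "-":
--             sign = token
--             i += 1
--         else:
--             words = []
--             while i < len(tokens) and tokens[i] != "+" and tokens[i] != "-":
--                 words.append(tokens[i])
--                 i += 1
--             bbq_patterns.append(sign + " ".join(words))
--     return bbq_patterns
-- ===== Notes on version B (the rewrite author's own statement) =====
-- stated objective: simpler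
-- what changed: Replaces A's flat pass with an in_range flag and in-place extension of the last pattern by a cursor-driven loop that keeps a current sign and collects each maximal run of non-sign tokens into a words list, emitting one pattern (the sign followed by the space-joined run) per run.
import Mathlib
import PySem

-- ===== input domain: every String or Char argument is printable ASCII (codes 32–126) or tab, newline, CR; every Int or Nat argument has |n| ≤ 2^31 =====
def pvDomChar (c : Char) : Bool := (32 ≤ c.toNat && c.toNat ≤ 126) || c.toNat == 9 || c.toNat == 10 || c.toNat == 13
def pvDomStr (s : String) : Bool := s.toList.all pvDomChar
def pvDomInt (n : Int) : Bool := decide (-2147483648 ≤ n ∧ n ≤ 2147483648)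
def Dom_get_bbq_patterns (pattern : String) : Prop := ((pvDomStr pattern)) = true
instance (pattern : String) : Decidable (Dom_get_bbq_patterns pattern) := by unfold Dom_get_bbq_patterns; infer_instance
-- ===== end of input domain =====

-- B replaces A's flag-driven flat pass (with in-place tail extension) by a sign
-- variable plus collecting each maximal run of non-sign tokens and joining it; objective: simpler.

-- ===== PORT A =====
-- bbq_patterns[-1] = bbq_patterns[-1] + " " + token  (only reached with the list non-empty)
def pvUpdateLast (l : List String) (t : String) : List String :=
  match l with
  | [] => []
  | [x] => [x ++ " " ++ t]
  | x :: xs => x :: pvUpdateLast xs t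

def pvAStep (st : List String × String × Bool) (p : Int × String) : List String × String × Bool :=
  match st, p with
  | (bbq, last, inR), (idx, tok) =>
    if tok = "+" ∨ tok = "-" then (bbq, tok, false)
    else if inR = false ∨ idx = 0 then (bbq ++ [last ++ tok], last, true)
    else (pvUpdateLast bbq tok, last, true)

def get_bbq_patterns (pattern : String) : List String :=
  let tokens := (PySem.Str.split? pattern " ").getD []
  ((PySem.List.enumerate tokens 0).foldl pvAStep ([], "+", true)).1

-- ===== PORT B =====
def pvIsSign (t : String) : Bool := t == "+" || t == "-"

-- the outer index loop of B, one step per sign token or per maximal run of non-sign tokens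
def pvAltGo : List String → String → List String
  | [], _ => []
  | t :: rest, sign =>
    if pvIsSign t then pvAltGo rest t
    else
      (sign ++ PySem.Str.join " " ((t :: rest).takeWhile (fun x => !pvIsSign x)))
        :: pvAltGo ((t :: rest).dropWhile (fun x => !pvIsSign x)) sign
termination_by toks _ => toks.length
decreasing_by
  · simp
  · rename_i h
    simp only [List.dropWhile_cons, h]
    exact Nat.lt_succ_of_le (List.length_dropWhile_le _ _)

def get_bbq_patterns_alt (pattern : String) : List String :=
  pvAltGo ((PySem.Str.split? pattern " ").getD []) "+"

-- ===== PRECONDITION & SPEC =====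
def Spec_get_bbq_patterns (pattern : String) (out : List String) : Prop := out = get_bbq_patterns_alt pattern
instance (pattern : String) (out : List String) : Decidable (Spec_get_bbq_patterns pattern out) := by unfold Spec_get_bbq_patterns; infer_instance

-- ===== CLAIM (what is proved, stated in full; the proofs are below) =====
def Claim_equal_get_bbq_patterns : Prop := ∀ (pattern : String), Dom_get_bbq_patterns pattern → Spec_get_bbq_patterns pattern (get_bbq_patterns pattern)

-- ===== LEMMAS AND PROOFS =====

-- the A-side loop with the index stripped (valid once idx ≥ 1, where 'idx == 0' is dead)
def pvLoopA : List String → (List String × String × Bool) → (List String × String × Bool)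
  | [], st => st
  | t :: rest, (bbq, last, inR) =>
    if t = "+" ∨ t = "-" then pvLoopA rest (bbq, t, false)
    else if inR = false then pvLoopA rest (bbq ++ [last ++ t], last, true)
    else pvLoopA rest (pvUpdateLast bbq t, last, true)

-- " " ++ word ++ " " ++ word ++ … : what B's join contributes after its first word
def pvJoinCont : List String → String
  | [] => ""
  | x :: xs => " " ++ x ++ pvJoinCont xs

lemma pvJoin_cons (x : String) (xs : List String) :
    PySem.Str.join " " (x :: xs) = x ++ pvJoinCont xs := by
  induction xs generalizing x with
  | nil =>
    apply String.toList_inj.mp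
    simp [PySem.Str.toList_join, PySem.Chars.join_singleton, pvJoinCont]
  | cons y ys ih =>
    apply String.toList_inj.mp
    have h := congrArg String.toList (ih y)
    simp only [PySem.Str.toList_join, List.map] at h ⊢
    rw [PySem.Chars.join_cons_cons, h]
    simp [pvJoinCont]

lemma pvUpdateLast_append (acc : List String) (cur t : String) :
    pvUpdateLast (acc ++ [cur]) t = acc ++ [cur ++ " " ++ t] := by
  induction acc with
  | nil => rfl
  | cons a as ih =>
    cases as with
    | nil => simp [pvUpdateLast]
    | cons b bs => simpa [pvUpdateLast] using ih

lemma pvEnum_foldl (toks : List String) :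
    ∀ (k : Int), 1 ≤ k → ∀ st,
      (PySem.List.enumerate toks k).foldl pvAStep st = pvLoopA toks st := by
  induction toks with
  | nil => intro k hk st; simp [PySem.List.enumerate_nil, pvLoopA]
  | cons t rest ih =>
    intro k hk st
    obtain ⟨bbq, last, inR⟩ := st
    rw [PySem.List.enumerate_cons, List.foldl_cons]
    have hk0 : ¬ (k = 0) := by omega
    by_cases hs : t = "+" ∨ t = "-"
    · simp only [pvAStep, pvLoopA, if_pos hs]
      exact ih (k + 1) (by omega) _
    · cases inR with
      | false =>
        simp only [pvAStep, hk0, or_false, pvLoopA, if_neg hs]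
        exact ih (k + 1) (by omega) _
      | true =>
        have : ¬ ((true : Bool) = false ∨ k = 0) := by simp [hk0]
        simp only [pvAStep, if_neg this, pvLoopA,
          if_neg hs, if_neg (by simp : ¬ ((true : Bool) = false))]
        exact ih (k + 1) (by omega) _

lemma pvSign_iff (t : String) : pvIsSign t = true ↔ (t = "+" ∨ t = "-") := by
  simp [pvIsSign]

-- the heart: the stripped A-loop equals B's run-collecting loop, in both flag states
lemma pvLoopA_alt (toks : List String) :
    (∀ acc last, (pvLoopA toks (acc, last, false)).1 = acc ++ pvAltGo toks last) ∧
    (∀ acc cur last, (pvLoopA toks (acc ++ [cur], last, true)).1 =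
      acc ++ (cur ++ pvJoinCont (toks.takeWhile (fun x => !pvIsSign x)))
        :: pvAltGo (toks.dropWhile (fun x => !pvIsSign x)) last) := by
  induction toks with
  | nil =>
    refine ⟨fun acc last => by simp [pvLoopA, pvAltGo], fun acc cur last => ?_⟩
    simp [pvLoopA, pvAltGo, pvJoinCont]
  | cons t rest ih =>
    obtain ⟨ihF, ihT⟩ := ih
    by_cases hs : t = "+" ∨ t = "-"
    · have hb : pvIsSign t = true := (pvSign_iff t).mpr hs
      constructor
      · intro acc last
        simp only [pvLoopA, if_pos hs, pvAltGo, hb]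
        exact ihF acc t
      · intro acc cur last
        simp only [pvLoopA, if_pos hs, List.takeWhile_cons, List.dropWhile_cons, hb,
          Bool.not_true, Bool.false_eq_true, if_false, pvJoinCont]
        rw [show acc ++ [cur] = (acc ++ [cur]) ++ ([] : List String) by simp] at *
        have := ihF (acc ++ [cur]) t
        simp only [List.append_nil] at this ⊢
        rw [this]
        simp [pvAltGo, hb, String.append_empty]
    · have hb : pvIsSign t = false := by
        cases h : pvIsSign t
        · rfl
        · exact absurd ((pvSign_iff t).mp h) hs
      constructor
      · intro acc last
        simp only [pvLoopA, if_neg hs]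
        rw [if_pos trivial]
        have := ihT acc (last ++ t) last
        rw [this]
        simp only [pvAltGo, hb, Bool.false_eq_true, if_false, List.takeWhile_cons,
          List.dropWhile_cons, Bool.not_false]
        rw [if_pos trivial, if_pos trivial, pvJoin_cons]
        simp [String.append_assoc]
      · intro acc cur last
        have hT : ¬ ((true : Bool) = false) := by simp
        simp only [pvLoopA, if_neg hs, if_neg hT]
        rw [pvUpdateLast_append]
        have := ihT acc (cur ++ " " ++ t) last
        rw [this]
        simp only [List.takeWhile_cons, List.dropWhile_cons, hb, Bool.not_false]
        rw [if_pos trivial, if_pos trivial]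
        simp [pvJoinCont, String.append_assoc]

lemma pvMain (toks : List String) :
    ((PySem.List.enumerate toks).foldl pvAStep ([], "+", true)).1 = pvAltGo toks "+" := by
  cases toks with
  | nil => simp [PySem.List.enumerate_nil, pvAltGo]
  | cons t rest =>
    rw [PySem.List.enumerate_cons, List.foldl_cons, pvEnum_foldl rest (0 + 1) (by omega)]
    by_cases hs : t = "+" ∨ t = "-"
    · have hb : pvIsSign t = true := (pvSign_iff t).mpr hs
      simp only [pvAStep, pvAltGo, if_pos hs, hb]
      exact (pvLoopA_alt rest).1 [] t
    · have hb : pvIsSign t = false := by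
        cases h : pvIsSign t
        · rfl
        · exact absurd ((pvSign_iff t).mp h) hs
      simp only [pvAStep, if_neg hs, or_true, List.nil_append]
      rw [if_pos trivial]
      have := (pvLoopA_alt rest).2 [] ("+" ++ t) "+"
      simp only [List.nil_append] at this
      rw [this]
      simp only [pvAltGo, hb, Bool.false_eq_true, if_false, List.takeWhile_cons,
        List.dropWhile_cons, Bool.not_false]
      rw [if_pos trivial, if_pos trivial, pvJoin_cons]
      simp [String.append_assoc]

-- ===== VERDICT (by name: the statement is the Claim_ definition above) =====
theorem get_bbq_patterns_spec : Claim_equal_get_bbq_patterns := by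
  intro pattern _
  unfold Spec_get_bbq_patterns get_bbq_patterns get_bbq_patterns_alt
  exact pvMain _
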